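-- pv_equiv track=rewrite | github.com/daswitez/Aurellis-fastApi | app/scraper/search_engines/ddg_search.py | _extract_brand_tokens
-- ===== SOURCE A (Python) =====
-- def _extract_brand_tokens(value: str) -> set[str]:
--     cleaned = "".join(char.lower() if char.isalnum() else " " for char in value)
--     tokens = {
--         token
--         for token in cleaned.split()
--         if len(token) >= 4 and token not in {"http", "https", "www", "site", "oficial", "official", "contacto", "contact"}
--     }
--     return tokens
-- ===== SOURCE B (Python) =====
-- _STOPWORDS = frozenset({"http", "https", "www", "site", "oficial", "official", "contacto", "contact"})
--
-- def _extract_brand_tokens(value: str) -> set[str]: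
--     # One left-to-right scan over maximal alphanumeric runs; no cleaned string, no split.
--     result = set()
--     i, n = 0, len(value)
--     while i < n:
--         if value[i].isalnum():
--             j = i
--             while j < n and value[j].isalnum():
--                 j += 1
--             token = "".join(c.lower() for c in value[i:j])
--             if len(token) >= 4 and token not in _STOPWORDS:
--                 result.add(token)
--             i = j
--         else:
--             i += 1
--     return result
-- ===== Notes on version B (the rewrite author's own statement) =====
-- stated objective: alternative
-- what changed: B replaces A's build-a-cleaned-string-then-split pipeline with a single two-index scan that walks maximal alphanumeric runs directly and maintains the result set as it goes.
import Mathlib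
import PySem

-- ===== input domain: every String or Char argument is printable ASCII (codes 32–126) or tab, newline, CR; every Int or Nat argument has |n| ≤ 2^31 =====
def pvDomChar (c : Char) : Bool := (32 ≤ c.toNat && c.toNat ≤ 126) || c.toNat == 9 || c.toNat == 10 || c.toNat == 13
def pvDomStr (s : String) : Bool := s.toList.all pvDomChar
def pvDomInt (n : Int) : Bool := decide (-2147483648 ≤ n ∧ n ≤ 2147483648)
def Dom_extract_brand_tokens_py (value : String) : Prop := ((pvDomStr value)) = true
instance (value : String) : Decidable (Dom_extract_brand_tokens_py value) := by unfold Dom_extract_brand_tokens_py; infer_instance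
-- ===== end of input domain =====

-- B replaces A's build-a-cleaned-string-then-split pipeline with a single scan over
-- maximal alphanumeric runs maintaining the result set directly (objective: alternative).

-- ===== PORT A =====
def extract_brand_tokens_py (value : String) : List String :=
  let cleaned : String :=
    String.ofList (value.toList.map
      (fun ch => if PySem.Chars.isalnum ch then PySem.Chars.lowerChar ch else ' '))
  PySem.Set.ofList ((PySem.Str.split₀ cleaned).filter
    (fun token => decide (4 ≤ PySem.Str.len token) &&
      !(PySem.Set.ofList
          ["http", "https", "www", "site", "oficial", "official", "contacto", "contact"]).contains token))

-- ===== PORT B =====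
def pvStopwords : PySem.Set String :=
  PySem.Set.ofList ["http", "https", "www", "site", "oficial", "official", "contacto", "contact"]

-- the while-loop of Source B: scan the remaining characters; on an alphanumeric character,
-- take the whole maximal alphanumeric run, form the lowered token, maybe add it, continue after the run
def pvScan : List Char → PySem.Set String → PySem.Set String
  | [], result => result
  | c :: rest, result =>
    if PySem.Chars.isalnum c then
      let run := List.takeWhile PySem.Chars.isalnum (c :: rest)
      let token := String.ofList (run.map PySem.Chars.lowerChar)
      pvScan (List.dropWhile PySem.Chars.isalnum (c :: rest))
        (if decide (4 ≤ PySem.Str.len token) && !pvStopwords.contains token then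
          PySem.Set.add result token
        else result)
    else pvScan rest result
  termination_by cs => cs.length
  decreasing_by
  · simp only [List.dropWhile_cons, *, if_pos]
    exact Nat.lt_succ_of_le (List.length_dropWhile_le _ _)
  · simp

def extract_brand_tokens_py_alt (value : String) : List String :=
  pvScan value.toList PySem.Set.empty

-- ===== PRECONDITION & SPEC =====
def Spec_extract_brand_tokens_py (value : String) (out : List String) : Prop := out = extract_brand_tokens_py_alt value
instance (value : String) (out : List String) : Decidable (Spec_extract_brand_tokens_py value out) := by unfold Spec_extract_brand_tokens_py; infer_instance

-- ===== CLAIM (what is proved, stated in full; the proofs are below) =====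
def Claim_equal_extract_brand_tokens_py : Prop := ∀ (value : String), Dom_extract_brand_tokens_py value → Spec_extract_brand_tokens_py value (extract_brand_tokens_py value)

-- ===== LEMMAS AND PROOFS =====

-- the maximal runs of characters satisfying p, in order
def pvRuns (p : Char → Bool) : List Char → List (List Char)
  | [] => []
  | c :: rest =>
    if p c then
      List.takeWhile p (c :: rest) :: pvRuns p (List.dropWhile p (c :: rest))
    else pvRuns p rest
  termination_by cs => cs.length
  decreasing_by
  · simp only [List.dropWhile_cons, *, if_pos]
    exact Nat.lt_succ_of_le (List.length_dropWhile_le _ _)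
  · simp

def pvClean (ch : Char) : Char :=
  if PySem.Chars.isalnum ch then PySem.Chars.lowerChar ch else ' '

lemma pvRuns_map (p : Char → Bool) (f : Char → Char) (l : List Char) :
    pvRuns p (l.map f) = (pvRuns (fun c => p (f c)) l).map (List.map f) := by
  induction l using pvRuns.induct (p := fun c => p (f c)) with
  | case1 => simp [pvRuns]
  | case2 c rest hp ih =>
      rw [List.map_cons, pvRuns, pvRuns, if_pos hp, if_pos hp, ← List.map_cons,
        List.takeWhile_map, List.dropWhile_map]
      simp only [Function.comp_def]
      rw [ih, List.map_cons]
  | case3 c rest hp ih =>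
      rw [List.map_cons, pvRuns, pvRuns, if_neg hp, if_neg hp, ih]

lemma pv_isspace_eq_false_of_toNat (d : Char) (h1 : 48 ≤ d.toNat) (h2 : d.toNat ≤ 122) :
    PySem.Chars.isspace d = false := by
  unfold PySem.Chars.isspace
  simp only [Bool.or_eq_false_iff, Bool.and_eq_false_iff, decide_eq_false_iff_not]
  omega

lemma pv_alnum_bounds (c : Char) (h : PySem.Chars.isalnum c = true) :
    48 ≤ c.toNat ∧ c.toNat ≤ 122 := by
  simp only [PySem.Chars.isalnum, PySem.Chars.isalpha, PySem.Chars.isupper, PySem.Chars.islower,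
    PySem.Chars.isdigit, Bool.or_eq_true, Bool.and_eq_true, decide_eq_true_eq, Char.le_def,
    UInt32.le_iff_toNat_le] at h
  have e : c.toNat = c.val.toNat := rfl
  have e1 : ('A' : Char).val.toNat = 65 := rfl
  have e2 : ('Z' : Char).val.toNat = 90 := rfl
  have e3 : ('a' : Char).val.toNat = 97 := rfl
  have e4 : ('z' : Char).val.toNat = 122 := rfl
  have e5 : ('0' : Char).val.toNat = 48 := rfl
  have e6 : ('9' : Char).val.toNat = 57 := rfl
  omega

lemma pv_upper_bounds (c : Char) (h : PySem.Chars.isupper c = true) :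
    65 ≤ c.toNat ∧ c.toNat ≤ 90 := by
  simp only [PySem.Chars.isupper, Bool.and_eq_true, decide_eq_true_eq, Char.le_def,
    UInt32.le_iff_toNat_le] at h
  have e : c.toNat = c.val.toNat := rfl
  have e1 : ('A' : Char).val.toNat = 65 := rfl
  have e2 : ('Z' : Char).val.toNat = 90 := rfl
  omega

lemma pv_isspace_lower_of_alnum (c : Char) (h : PySem.Chars.isalnum c = true) :
    PySem.Chars.isspace (PySem.Chars.lowerChar c) = false := by
  unfold PySem.Chars.lowerChar
  by_cases hu : PySem.Chars.isupper c = true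
  · obtain ⟨hu1, hu2⟩ := pv_upper_bounds c hu
    rw [if_pos hu]
    have hv : (Char.ofNat (c.toNat + 32)).toNat = c.toNat + 32 := by
      rw [Char.toNat_ofNat, if_pos (Or.inl (by omega))]
    exact pv_isspace_eq_false_of_toNat _ (by omega) (by omega)
  · obtain ⟨h1, h2⟩ := pv_alnum_bounds c h
    rw [if_neg hu]
    exact pv_isspace_eq_false_of_toNat _ h1 h2

lemma pv_notspace_clean (c : Char) :
    (!PySem.Chars.isspace (pvClean c)) = PySem.Chars.isalnum c := by
  unfold pvClean
  by_cases h : PySem.Chars.isalnum c = true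
  · rw [if_pos h, pv_isspace_lower_of_alnum c h, h]; rfl
  · rw [if_neg h]
    simp only [Bool.not_eq_true] at h
    rw [h]
    decide

-- split₀.go in terms of pvRuns
lemma pv_go_eq (cs cur : List Char) (acc : List (List Char)) :
    PySem.Chars.split₀.go cs cur acc =
      acc.reverse ++
        (if cur.isEmpty then pvRuns (fun d => !PySem.Chars.isspace d) cs
         else (cur.reverse ++ List.takeWhile (fun d => !PySem.Chars.isspace d) cs) ::
            pvRuns (fun d => !PySem.Chars.isspace d)
              (List.dropWhile (fun d => !PySem.Chars.isspace d) cs)) := by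
  induction cs generalizing cur acc with
  | nil =>
      unfold PySem.Chars.split₀.go
      cases cur with
      | nil => simp [pvRuns]
      | cons x xs => simp [pvRuns]
  | cons c rest ih =>
      unfold PySem.Chars.split₀.go
      by_cases hs : PySem.Chars.isspace c = true
      · simp only [hs, if_true]
        cases cur with
        | nil => simp [ih, pvRuns, hs]
        | cons x xs => simp [ih, pvRuns, hs]
      · have hs' : PySem.Chars.isspace c = false := by rwa [Bool.not_eq_true] at hs
        simp only [hs', Bool.false_eq_true, if_false]
        cases cur with
        | nil => simp [ih, pvRuns, hs']
        | cons x xs =>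
            simp [ih, hs', List.append_assoc]

lemma pv_split₀_eq (ds : List Char) :
    PySem.Chars.split₀ ds = pvRuns (fun d => !PySem.Chars.isspace d) ds := by
  rw [PySem.Chars.split₀, pv_go_eq]
  simp

lemma pv_mem_runs_alnum (r : List Char) (l : List Char)
    (h : r ∈ pvRuns PySem.Chars.isalnum l) : ∀ x ∈ r, PySem.Chars.isalnum x = true := by
  induction l using pvRuns.induct (p := PySem.Chars.isalnum) with
  | case1 => simp [pvRuns] at h
  | case2 c rest hp ih =>
      rw [pvRuns, if_pos hp] at h
      rcases List.mem_cons.mp h with h | h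
      · subst h; exact fun x hx => List.mem_takeWhile_imp hx
      · exact ih h
  | case3 c rest hp ih =>
      rw [pvRuns, if_neg hp] at h
      exact ih h

def pvPred (token : String) : Bool :=
  decide (4 ≤ PySem.Str.len token) && !pvStopwords.contains token

-- B's scan is a fold of Set.add over the good tokens of the alnum runs
lemma pvScan_eq (cs : List Char) (acc : PySem.Set String) :
    pvScan cs acc =
      List.foldl PySem.Set.add acc
        (((pvRuns PySem.Chars.isalnum cs).map
            (fun r => String.ofList (r.map PySem.Chars.lowerChar))).filter pvPred) := by
  induction cs using pvRuns.induct (p := PySem.Chars.isalnum) generalizing acc with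
  | case1 => simp [pvScan, pvRuns]
  | case2 c rest hp ih =>
      rw [pvRuns, if_pos hp, List.map_cons, List.filter_cons]
      simp only [pvScan, hp, if_true, ih]
      by_cases hq : pvPred (String.ofList (List.map PySem.Chars.lowerChar
          (List.takeWhile PySem.Chars.isalnum (c :: rest)))) = true
      · rw [if_pos hq, List.foldl_cons]
        congr 1
        rw [if_pos]
        exact hq
      · rw [if_neg hq]
        congr 1
        rw [if_neg]
        exact hq
  | case3 c rest hp ih =>
      rw [pvRuns, if_neg hp, pvScan]
      have hp' : PySem.Chars.isalnum c = false := by rwa [Bool.not_eq_true] at hp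
      rw [if_neg (by simp [hp']), ih]

-- ===== VERDICT (by name: the statement is the Claim_ definition above) =====
theorem extract_brand_tokens_py_spec : Claim_equal_extract_brand_tokens_py := by
  intro value _
  unfold Spec_extract_brand_tokens_py extract_brand_tokens_py extract_brand_tokens_py_alt
  rw [pvScan_eq]
  simp only [PySem.Str.split₀, String.toList_ofList]
  have hmap : (value.toList.map pvClean) =
      value.toList.map (fun ch => if PySem.Chars.isalnum ch then PySem.Chars.lowerChar ch else ' ') := rfl
  rw [← hmap, pv_split₀_eq, pvRuns_map]
  have hfun : (fun c => !PySem.Chars.isspace (pvClean c)) = PySem.Chars.isalnum :=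
    funext pv_notspace_clean
  rw [hfun]
  have hruns : (pvRuns PySem.Chars.isalnum value.toList).map (List.map pvClean) =
      (pvRuns PySem.Chars.isalnum value.toList).map (List.map PySem.Chars.lowerChar) := by
    apply List.map_congr_left
    intro r hr
    exact List.map_congr_left (fun x hx => by
      unfold pvClean
      rw [if_pos (pv_mem_runs_alnum r _ hr x hx)])
  rw [hruns, List.map_map]
  rfl
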